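-- pv_equiv track=rewrite | github.com/aaravm10/portfolio | projects/Matchday/utils/player_history.py | get_cumulative_timeline
-- ===== SOURCE A (Python) =====
-- def get_cumulative_timeline(history: list) -> list:
--     """
--     Build cumulative season totals per gameweek.
--
--     Returns:
--         [{'round', 'cumulative_goals', 'cumulative_assists', 'cumulative_points', 'cumulative_minutes'}]
--     """
--     played = [gw for gw in history if gw.get("minutes", 0) > 0 or gw.get("total_points", 0) != 0]
--
--     cum_goals = 0
--     cum_assists = 0
--     cum_points = 0
--     cum_minutes = 0
--
--     timeline = []
--     for gw in played:
--         cum_goals += gw.get("goals_scored", 0)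
--         cum_assists += gw.get("assists", 0)
--         cum_points += gw.get("total_points", 0)
--         cum_minutes += gw.get("minutes", 0)
--         timeline.append({
--             "round": gw.get("round"),
--             "cumulative_goals": cum_goals,
--             "cumulative_assists": cum_assists,
--             "cumulative_points": cum_points,
--             "cumulative_minutes": cum_minutes,
--         })
--
--     return timeline
-- ===== SOURCE B (Python) =====
-- def _prefix_sums(values):
--     sums = []
--     total = 0
--     for v in values:
--         total += v
--         sums.append(total)
--     return sums
--
--
-- def get_cumulative_timeline(history: list) -> list:
--     """Cumulative season totals per gameweek via four independent prefix-sum passes."""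
--     played = [gw for gw in history if gw.get("minutes", 0) > 0 or gw.get("total_points", 0) != 0]
--     goals = _prefix_sums([gw.get("goals_scored", 0) for gw in played])
--     assists = _prefix_sums([gw.get("assists", 0) for gw in played])
--     points = _prefix_sums([gw.get("total_points", 0) for gw in played])
--     minutes = _prefix_sums([gw.get("minutes", 0) for gw in played])
--     return [
--         {
--             "round": gw.get("round"),
--             "cumulative_goals": g,
--             "cumulative_assists": a,
--             "cumulative_points": p,
--             "cumulative_minutes": m,
--         }
--         for (((gw, g), a), p), m in zip(zip(zip(zip(played, goals), assists), points), minutes)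
--     ]
-- ===== Notes on version B (the rewrite author's own statement) =====
-- stated objective: alternative
-- what changed: Replaces A's single fused loop carrying four running counters with four independent prefix-sum passes over the played gameweeks plus a final zip that assembles the result dicts.
import Mathlib
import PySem

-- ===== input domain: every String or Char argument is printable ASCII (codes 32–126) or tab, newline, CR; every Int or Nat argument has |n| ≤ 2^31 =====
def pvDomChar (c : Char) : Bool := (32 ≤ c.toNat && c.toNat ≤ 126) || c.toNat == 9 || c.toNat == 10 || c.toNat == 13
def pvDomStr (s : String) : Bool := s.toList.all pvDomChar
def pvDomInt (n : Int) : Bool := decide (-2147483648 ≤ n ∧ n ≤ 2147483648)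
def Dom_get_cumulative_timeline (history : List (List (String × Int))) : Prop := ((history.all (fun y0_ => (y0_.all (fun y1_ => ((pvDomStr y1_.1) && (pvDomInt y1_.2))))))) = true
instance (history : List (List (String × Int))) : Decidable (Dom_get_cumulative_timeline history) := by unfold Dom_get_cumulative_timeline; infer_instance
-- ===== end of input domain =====

-- B computes the same timeline by four independent prefix-sum passes zipped with the
-- played rounds, instead of A's single fused loop over four running counters (objective: alternative decomposition).


-- shared primitive: Python's gw.get(k, 0) on the association-list dict (first match)
def dget (gw : List (String × Int)) (k : String) (d : Int) : Int :=
  (PySem.Dict.mk gw).getD k d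

-- Python's gw.get("round"); under Pre_ the key is present, so the .getD 0 default is never used
def rget (gw : List (String × Int)) : Int :=
  ((PySem.Dict.mk gw).get? "round").getD 0

-- the 'played' filter both versions share (A's and B's comprehensions are identical)
def playedP (gw : List (String × Int)) : Bool :=
  decide (dget gw "minutes" 0 > 0) || decide (dget gw "total_points" 0 ≠ 0)

-- one emitted result dict (insertion order of the Python dict literal)
def entry (gw : List (String × Int)) (g a p m : Int) : List (String × Int) :=
  [("round", rget gw), ("cumulative_goals", g), ("cumulative_assists", a),
   ("cumulative_points", p), ("cumulative_minutes", m)]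

-- ===== PORT A =====
def get_cumulative_timeline (history : List (List (String × Int))) : List (List (String × Int)) :=
  let played := history.filter playedP
  (played.foldl
    (fun (st : Int × Int × Int × Int × List (List (String × Int))) gw =>
      let g := st.1 + dget gw "goals_scored" 0
      let a := st.2.1 + dget gw "assists" 0
      let p := st.2.2.1 + dget gw "total_points" 0
      let m := st.2.2.2.1 + dget gw "minutes" 0
      (g, a, p, m, st.2.2.2.2 ++ [entry gw g a p m]))
    (0, 0, 0, 0, [])).2.2.2.2

-- ===== PORT B =====
-- B's helper _prefix_sums: running total, appending each total
def prefixSums (xs : List Int) : List Int :=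
  (xs.foldl (fun (st : Int × List Int) v => (st.1 + v, st.2 ++ [st.1 + v])) (0, [])).2

def get_cumulative_timeline_alt (history : List (List (String × Int))) : List (List (String × Int)) :=
  let played := history.filter playedP
  let goals := prefixSums (played.map (fun gw => dget gw "goals_scored" 0))
  let assists := prefixSums (played.map (fun gw => dget gw "assists" 0))
  let points := prefixSums (played.map (fun gw => dget gw "total_points" 0))
  let minutes := prefixSums (played.map (fun gw => dget gw "minutes" 0))
  ((((played.zip goals).zip assists).zip points).zip minutes).map
    (fun x => entry x.1.1.1.1 x.1.1.1.2 x.1.1.2 x.1.2 x.2)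

-- ===== PRECONDITION & SPEC =====
-- Pre_ excludes inputs where some played gameweek lacks a "round" key: there Python's
-- gw.get("round") is None, not an Int, so A's result leaves the declared value type.
def Pre_get_cumulative_timeline (history : List (List (String × Int))) : Prop :=
  ∀ gw ∈ history, playedP gw = true → (PySem.Dict.mk gw).contains "round" = true
instance (history : List (List (String × Int))) : Decidable (Pre_get_cumulative_timeline history) := by unfold Pre_get_cumulative_timeline; infer_instance

def pvWitness_get_cumulative_timeline : (List (List (String × Int))) :=
  [[("round", 1), ("minutes", 90), ("goals_scored", 1)], [("round", 2), ("minutes", 0)]]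

def Spec_get_cumulative_timeline (history : List (List (String × Int))) (out : List (List (String × Int))) : Prop := out = get_cumulative_timeline_alt history
instance (history : List (List (String × Int))) (out : List (List (String × Int))) : Decidable (Spec_get_cumulative_timeline history out) := by unfold Spec_get_cumulative_timeline; infer_instance

-- ===== CLAIM (what is proved, stated in full; the proofs are below) =====
def Claim_equal_get_cumulative_timeline : Prop := ∀ (history : List (List (String × Int))), Dom_get_cumulative_timeline history → Pre_get_cumulative_timeline history → Spec_get_cumulative_timeline history (get_cumulative_timeline history)

-- ===== LEMMAS AND PROOFS =====

-- reference recursion both ports reduce to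
def buildFrom : List (List (String × Int)) → Int → Int → Int → Int → List (List (String × Int))
  | [], _, _, _, _ => []
  | gw :: t, g, a, p, m =>
    entry gw (g + dget gw "goals_scored" 0) (a + dget gw "assists" 0)
             (p + dget gw "total_points" 0) (m + dget gw "minutes" 0)
      :: buildFrom t (g + dget gw "goals_scored" 0) (a + dget gw "assists" 0)
                     (p + dget gw "total_points" 0) (m + dget gw "minutes" 0)

def psFrom : Int → List Int → List Int
  | _, [] => []
  | t, x :: xs => (t + x) :: psFrom (t + x) xs

lemma foldlA_eq (l : List (List (String × Int))) :
    ∀ (g a p m : Int) (acc : List (List (String × Int))),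
      (l.foldl
        (fun (st : Int × Int × Int × Int × List (List (String × Int))) gw =>
          let g := st.1 + dget gw "goals_scored" 0
          let a := st.2.1 + dget gw "assists" 0
          let p := st.2.2.1 + dget gw "total_points" 0
          let m := st.2.2.2.1 + dget gw "minutes" 0
          (g, a, p, m, st.2.2.2.2 ++ [entry gw g a p m]))
        (g, a, p, m, acc)).2.2.2.2 = acc ++ buildFrom l g a p m := by
  induction l with
  | nil => intro g a p m acc; simp [buildFrom]
  | cons gw t ih =>
    intro g a p m acc
    simp only [List.foldl_cons, buildFrom]
    rw [ih]
    simp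

lemma foldlPS_eq (xs : List Int) :
    ∀ (t : Int) (acc : List Int),
      (xs.foldl (fun (st : Int × List Int) v => (st.1 + v, st.2 ++ [st.1 + v])) (t, acc)).2
        = acc ++ psFrom t xs := by
  induction xs with
  | nil => intro t acc; simp [psFrom]
  | cons x xs ih =>
    intro t acc
    simp only [List.foldl_cons, psFrom]
    rw [ih]
    simp

lemma prefixSums_eq (xs : List Int) : prefixSums xs = psFrom 0 xs := by
  simp [prefixSums, foldlPS_eq]

lemma zip_map_eq (l : List (List (String × Int))) :
    ∀ (g a p m : Int),
      ((((l.zip (psFrom g (l.map (fun gw => dget gw "goals_scored" 0)))).zip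
           (psFrom a (l.map (fun gw => dget gw "assists" 0)))).zip
           (psFrom p (l.map (fun gw => dget gw "total_points" 0)))).zip
           (psFrom m (l.map (fun gw => dget gw "minutes" 0)))).map
        (fun x => entry x.1.1.1.1 x.1.1.1.2 x.1.1.2 x.1.2 x.2)
        = buildFrom l g a p m := by
  induction l with
  | nil => intro g a p m; simp [psFrom, buildFrom]
  | cons gw t ih =>
    intro g a p m
    simp only [List.map_cons, psFrom, List.zip_cons_cons, buildFrom, List.map]
    rw [ih]

-- ===== VERDICT (by name: the statement is the Claim_ definition above) =====
theorem get_cumulative_timeline_spec : Claim_equal_get_cumulative_timeline := by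
  intro history _ _
  unfold Spec_get_cumulative_timeline get_cumulative_timeline get_cumulative_timeline_alt
  simp only [prefixSums_eq, foldlA_eq, zip_map_eq, List.nil_append]
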